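-- pv_equiv track=rewrite | github.com/vladn90/Algorithms | Hashing/equal.py | equal_hash
-- ===== SOURCE A (Python) =====
-- def equal_hash(array):
--     """ Hashing based algorithm.
--     Time complexity: O(n ^ 2). Space complexity: O(n), n is len(array).
--     """
--     n = len(array)
--     sums = dict()  # previous sum: start, end indices
--     result = [n, n, n, n]
--     for i in range(n - 1):
--         for j in range(i + 1, n):
--             curr_sum = array[i] + array[j]
--             if curr_sum in sums:  # we've already seen this sum
--                 A1, B1 = sums[curr_sum]
--                 if A1 < i and B1 != i and B1 != j:  # A1 < C1, B1 != C1, B1 != D1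
--                     curr_result = [A1, B1, i, j]
--                     result = min(result, curr_result)
--             else:
--                 sums[curr_sum] = (i, j)  # hash current sum
--     return result if result != [n, n, n, n] else []
-- ===== SOURCE B (Python) =====
-- def equal_hash(array):
--     """Group-by-sum variant: phase 1 collects, for every pair sum, the full
--     list of index pairs achieving it; phase 2 scans each group, comparing its
--     first pair against the later ones, tracking the best candidate (or None)."""
--     n = len(array)
--     groups = {}
--     for i in range(n - 1):
--         for j in range(i + 1, n):
--             groups.setdefault(array[i] + array[j], []).append((i, j))
--     best = None
--     for pairs in groups.values():
--         a1, b1 = pairs[0]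
--         for i, j in pairs[1:]:
--             if a1 < i and b1 != i and b1 != j:
--                 cand = [a1, b1, i, j]
--                 if best is None or cand < best:
--                     best = cand
--     return best if best is not None else []
-- ===== Notes on version B (the rewrite author's own statement) =====
-- stated objective: alternative
-- what changed: Replaces A's single interleaved scan (hash first pair per sum and test candidates in the same pass with a [n,n,n,n] sentinel) by a group-by-sum decomposition: phase 1 builds a dict mapping each pair sum to the full ordered list of index pairs achieving it, phase 2 iterates over the dict's value groups comparing each group's first pair against the later ones, tracking the best candidate with a None sentinel.
import Mathlib
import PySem

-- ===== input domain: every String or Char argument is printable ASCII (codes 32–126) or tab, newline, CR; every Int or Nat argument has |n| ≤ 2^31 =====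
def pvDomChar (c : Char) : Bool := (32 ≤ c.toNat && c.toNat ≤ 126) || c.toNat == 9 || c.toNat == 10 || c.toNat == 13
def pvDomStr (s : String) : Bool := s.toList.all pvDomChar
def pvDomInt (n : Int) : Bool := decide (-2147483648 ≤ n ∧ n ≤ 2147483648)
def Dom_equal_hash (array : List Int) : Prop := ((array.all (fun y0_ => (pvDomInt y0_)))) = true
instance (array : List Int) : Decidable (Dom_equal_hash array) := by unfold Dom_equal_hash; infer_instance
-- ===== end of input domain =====

-- B replaces A's single interleaved scan (hash first pair per sum, test candidates in the same
-- pass with a [n,n,n,n] sentinel) by a group-by-sum decomposition: build the full dict of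
-- sum -> list of index pairs, then scan each group's first pair against its later pairs with a
-- None sentinel (objective: alternative).

-- Python's `xs < ys` on lists of ints (lexicographic); `min(xs, ys)` = `ys if ys < xs else xs`.
def pyListLt : List Int → List Int → Bool
  | _, [] => false
  | [], _ :: _ => true
  | a :: as, b :: bs => a < b || (a == b && pyListLt as bs)

-- ===== PORT A =====
-- indices produced by pyRange are always in range, so pyGetD's default 0 is never used
def equal_hash (array : List Int) : List Int :=
  let n : Int := (array.length : Int)
  let st :=
    (PySem.List.pyRange 0 (n - 1) 1).foldl (fun st i =>
      (PySem.List.pyRange (i + 1) n 1).foldl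
        (fun (st : PySem.Dict Int (Int × Int) × List Int) j =>
          let currSum := PySem.List.pyGetD array i 0 + PySem.List.pyGetD array j 0
          match st.1.get? currSum with
          | some q =>
              if q.1 < i ∧ q.2 ≠ i ∧ q.2 ≠ j then
                (st.1, if pyListLt [q.1, q.2, i, j] st.2 then [q.1, q.2, i, j] else st.2)
              else st
          | none => (st.1.insert currSum (i, j), st.2)) st)
      ((PySem.Dict.empty : PySem.Dict Int (Int × Int)), [n, n, n, n])
  if st.2 ≠ [n, n, n, n] then st.2 else []

-- ===== PORT B =====
-- phase 1: dict mapping each pair sum to the list of ALL its index pairs, in scan order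
-- (groups.setdefault(s, []).append(p) is exactly Dict.modify s [] (· ++ [p]));
-- phase 2: scan the dict's value groups, first pair vs the rest, None sentinel.
def equal_hash_alt (array : List Int) : List Int :=
  let n : Int := (array.length : Int)
  let groups :=
    (PySem.List.pyRange 0 (n - 1) 1).foldl (fun g i =>
      (PySem.List.pyRange (i + 1) n 1).foldl
        (fun (g : PySem.Dict Int (List (Int × Int))) j =>
          g.modify (PySem.List.pyGetD array i 0 + PySem.List.pyGetD array j 0) []
            (· ++ [(i, j)])) g)
      PySem.Dict.empty
  let best :=
    groups.values.foldl (fun (best : Option (List Int)) pairs =>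
      -- pairs[0]: a group's list is never empty, so pyGetD's default (0, 0) is never used
      let q := PySem.List.pyGetD pairs 0 (0, 0)
      (PySem.List.slice pairs (some 1) none).foldl (fun best p =>
        if q.1 < p.1 ∧ q.2 ≠ p.1 ∧ q.2 ≠ p.2 then
          match best with
          | none => some [q.1, q.2, p.1, p.2]
          | some b => if pyListLt [q.1, q.2, p.1, p.2] b then some [q.1, q.2, p.1, p.2] else some b
        else best) best) none
  match best with
  | some r => r
  | none => []

-- ===== PRECONDITION & SPEC =====
def Spec_equal_hash (array : List Int) (out : List Int) : Prop := out = equal_hash_alt array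
instance (array : List Int) (out : List Int) : Decidable (Spec_equal_hash array out) := by unfold Spec_equal_hash; infer_instance

-- ===== CLAIM (what is proved, stated in full; the proofs are below) =====
def Claim_equal_equal_hash : Prop := ∀ (array : List Int), Dom_equal_hash array → Spec_equal_hash array (equal_hash array)

-- ===== LEMMAS AND PROOFS =====

/-- The flattened list of index pairs both double loops traverse. -/
def pvPairs (n : Int) : List (Int × Int) :=
  (PySem.List.pyRange 0 (n - 1) 1).flatMap
    (fun i => (PySem.List.pyRange (i + 1) n 1).map (fun j => (i, j)))

/-- Sum keyed by a pair. -/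
def pvSum (array : List Int) (p : Int × Int) : Int :=
  PySem.List.pyGetD array p.1 0 + PySem.List.pyGetD array p.2 0

/-- A nested double-loop foldl is the foldl over the flattened pair list. -/
theorem pvFoldlNested {σ : Type} (n : Int) (f : σ → Int × Int → σ) (init : σ) :
    (PySem.List.pyRange 0 (n - 1) 1).foldl (fun s i =>
      (PySem.List.pyRange (i + 1) n 1).foldl (fun s j => f s (i, j)) s) init
    = (pvPairs n).foldl f init := by
  rw [pvPairs, List.foldl_flatMap]; simp only [List.foldl_map]

/-- Python's `min` on int lists. -/
def pvMinL (r c : List Int) : List Int := if pyListLt c r then c else r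

/-- The None-sentinel minimum step of B's phase 2. -/
def pvOStep (b : Option (List Int)) (c : List Int) : Option (List Int) :=
  some (match b with | none => c | some r => pvMinL r c)

/-- The candidate a pair contributes given the first-pair table `f`. -/
def pvCand (array : List Int) (f : Int → Option (Int × Int)) (p : Int × Int) :
    Option (List Int) :=
  match f (pvSum array p) with
  | some q =>
      if q.1 < p.1 ∧ q.2 ≠ p.1 ∧ q.2 ≠ p.2 then some [q.1, q.2, p.1, p.2] else none
  | none => none

/-- Candidate relative to an explicit first pair `q`. -/
def pvCandQ (q p : Int × Int) : Option (List Int) :=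
  if q.1 < p.1 ∧ q.2 ≠ p.1 ∧ q.2 ≠ p.2 then some [q.1, q.2, p.1, p.2] else none

/-- The per-pair step of A's loop (on a dict-result state). -/
def pvStepA (array : List Int) (st : PySem.Dict Int (Int × Int) × List Int) (p : Int × Int) :
    PySem.Dict Int (Int × Int) × List Int :=
  match st.1.get? (pvSum array p) with
  | some q =>
      if q.1 < p.1 ∧ q.2 ≠ p.1 ∧ q.2 ≠ p.2 then
        (st.1, if pyListLt [q.1, q.2, p.1, p.2] st.2 then [q.1, q.2, p.1, p.2] else st.2)
      else st
  | none => (st.1.insert (pvSum array p) p, st.2)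

/-- A's scan against the final first-pair table, as a pure min step. -/
def pvStepB (array : List Int) (f : Int → Option (Int × Int)) (r : List Int) (p : Int × Int) :
    List Int :=
  match pvCand array f p with
  | some c => pvMinL r c
  | none => r

/-- Core invariant: if `f` answers every lookup as "first match in d, else first match in the
remaining pairs", A's interleaved loop computes the table-based min scan. -/
theorem pvMain (array : List Int) (f : Int → Option (Int × Int)) :
    ∀ (ps : List (Int × Int)) (d : PySem.Dict Int (Int × Int)) (r : List Int),
      (∀ v, f v = (d.get? v).or (ps.find? (fun p => pvSum array p == v))) →
      (ps.foldl (pvStepA array) (d, r)).2 = ps.foldl (pvStepB array f) r := by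
  intro ps
  induction ps with
  | nil => intro d r _; rfl
  | cons p ps ih =>
    intro d r hf
    have hv := hf (pvSum array p)
    simp only [List.find?_cons, beq_self_eq_true] at hv
    simp only [List.foldl_cons]
    cases hd : d.get? (pvSum array p) with
    | some q =>
      rw [hd] at hv
      simp only [Option.some_or] at hv
      have hstA : pvStepA array (d, r) p =
          (d, if q.1 < p.1 ∧ q.2 ≠ p.1 ∧ q.2 ≠ p.2 then
                (if pyListLt [q.1, q.2, p.1, p.2] r then [q.1, q.2, p.1, p.2] else r)
              else r) := by
        simp only [pvStepA, hd]; split_ifs <;> rfl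
      have hstB : pvStepB array f r p =
          (if q.1 < p.1 ∧ q.2 ≠ p.1 ∧ q.2 ≠ p.2 then
             (if pyListLt [q.1, q.2, p.1, p.2] r then [q.1, q.2, p.1, p.2] else r)
           else r) := by
        simp only [pvStepB, pvCand, hv]
        split_ifs <;> simp [pvMinL, *]
      rw [hstA, hstB]
      apply ih
      intro v
      rw [hf v, List.find?_cons]
      by_cases hvv : pvSum array p = v
      · subst hvv; simp [hd]
      · simp [beq_eq_false_iff_ne.mpr hvv]
    | none =>
      rw [hd] at hv
      simp only [Option.none_or] at hv
      have hstB : pvStepB array f r p = r := by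
        simp only [pvStepB, pvCand, hv]
        rw [if_neg (by rintro ⟨h1, -⟩; exact lt_irrefl _ h1)]
      have hstA : pvStepA array (d, r) p = (d.insert (pvSum array p) p, r) := by
        simp only [pvStepA, hd]
      rw [hstA, hstB]
      apply ih
      intro v
      rw [hf v, List.find?_cons]
      by_cases hvv : pvSum array p = v
      · subst hvv
        simp [PySem.Dict.get?_insert_self, hd]
      · rw [PySem.Dict.get?_insert_of_ne _ _ (fun h => hvv h.symm)]
        simp [beq_eq_false_iff_ne.mpr hvv]

-- ---- strict lexicographic order facts ----

theorem pyListLt_irrefl : ∀ a : List Int, pyListLt a a = false := by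
  intro a; induction a with
  | nil => rfl
  | cons x xs ih => simp [pyListLt, ih]

theorem pyListLt_trans : ∀ a b c : List Int,
    pyListLt a b = true → pyListLt b c = true → pyListLt a c = true := by
  intro a
  induction a with
  | nil =>
    intro b c hab hbc
    cases b <;> cases c <;> simp_all [pyListLt]
  | cons x xs ih =>
    intro b c hab hbc
    cases b with
    | nil => simp [pyListLt] at hab
    | cons y ys =>
      cases c with
      | nil => simp [pyListLt] at hbc
      | cons z zs =>
        simp only [pyListLt, Bool.or_eq_true, Bool.and_eq_true, decide_eq_true_eq,
          beq_iff_eq] at hab hbc ⊢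
        rcases hab with h1 | ⟨h1, h1'⟩ <;> rcases hbc with h2 | ⟨h2, h2'⟩
        · exact Or.inl (by omega)
        · exact Or.inl (by omega)
        · exact Or.inl (by omega)
        · exact Or.inr ⟨by omega, ih _ _ h1' h2'⟩

theorem pyListLt_eq_of_not : ∀ a b : List Int,
    pyListLt a b = false → pyListLt b a = false → a = b := by
  intro a
  induction a with
  | nil => intro b h _; cases b with | nil => rfl | cons y ys => simp [pyListLt] at h
  | cons x xs ih =>
    intro b hab hba
    cases b with
    | nil => simp [pyListLt] at hba
    | cons y ys =>
      simp only [pyListLt, Bool.or_eq_false_iff, Bool.and_eq_false_iff,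
        decide_eq_false_iff_not, beq_eq_false_iff_ne, ne_eq] at hab hba
      have hxy : x = y := by
        rcases hab with ⟨h1, _⟩; rcases hba with ⟨h2, _⟩; omega
      subst hxy
      rcases hab.2 with h | h
      · exact absurd rfl h
      · rcases hba.2 with h' | h'
        · exact absurd rfl h'
        · rw [ih _ h h']

theorem pyListLt_asymm {a b : List Int} (h : pyListLt a b = true) : pyListLt b a = false := by
  by_contra hc
  have hba : pyListLt b a = true := by
    cases hh : pyListLt b a with
    | true => rfl
    | false => exact absurd hh hc
  have := pyListLt_trans a b a h hba
  rw [pyListLt_irrefl] at this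
  exact Bool.false_ne_true this

theorem pvMinL_right_comm (z x y : List Int) :
    pvMinL (pvMinL z x) y = pvMinL (pvMinL z y) x := by
  unfold pvMinL
  by_cases hxz : pyListLt x z = true
  · by_cases hyz : pyListLt y z = true
    · simp only [if_pos hxz, if_pos hyz]
      by_cases hyx : pyListLt y x = true
      · have hxy : ¬ pyListLt x y = true := by
          rw [pyListLt_asymm hyx]; simp
        simp only [if_pos hyx, if_neg hxy]
      · by_cases hxy : pyListLt x y = true
        · simp only [if_neg hyx, if_pos hxy]
        · simp only [if_neg hyx, if_neg hxy]
          exact pyListLt_eq_of_not x y (by simpa using hxy) (by simpa using hyx)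
    · have hyx : ¬ pyListLt y x = true := fun hyx => hyz (pyListLt_trans _ _ _ hyx hxz)
      simp only [if_pos hxz, if_neg hyz, if_neg hyx]
  · by_cases hyz : pyListLt y z = true
    · have hxy : ¬ pyListLt x y = true := fun hxy => hxz (pyListLt_trans _ _ _ hxy hyz)
      simp only [if_neg hxz, if_pos hyz, if_neg hxy]
    · simp only [if_neg hxz, if_neg hyz]

theorem pvOStep_some : ∀ (cs : List (List Int)) (x : List Int),
    cs.foldl pvOStep (some x) = some (cs.foldl pvMinL x) := by
  intro cs
  induction cs with
  | nil => intro x; rfl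
  | cons c cs ih => intro x; simp only [List.foldl_cons, pvOStep]; exact ih _

theorem pvFoldlMinL_mem : ∀ (cs : List (List Int)) (x : List Int),
    cs.foldl pvMinL x = x ∨ cs.foldl pvMinL x ∈ cs := by
  intro cs
  induction cs with
  | nil => intro x; exact Or.inl rfl
  | cons c cs ih =>
    intro x
    simp only [List.foldl_cons]
    rcases ih (pvMinL x c) with h | h
    · rw [h]; unfold pvMinL; split_ifs with hh
      · exact Or.inr (List.mem_cons_self)
      · exact Or.inl rfl
    · exact Or.inr (List.mem_cons_of_mem _ h)

/-- Grouping a list by key values (over a nodup, covering key list) is a permutation. -/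
theorem pvGroupPerm (g : Int × Int → Int) :
    ∀ (K : List Int) (ps : List (Int × Int)), K.Nodup → (∀ p ∈ ps, g p ∈ K) →
      (K.flatMap (fun s => ps.filter (fun p => g p == s))).Perm ps := by
  intro K
  induction K with
  | nil =>
    intro ps _ hcov
    cases ps with
    | nil => simp
    | cons p ps' => exact absurd (hcov p List.mem_cons_self) (by simp)
  | cons s K' ih =>
    intro ps hnd hcov
    have hns : s ∉ K' := (List.nodup_cons.mp hnd).1
    have hnd' : K'.Nodup := (List.nodup_cons.mp hnd).2
    simp only [List.flatMap_cons]
    have hcongr : K'.flatMap (fun s' => ps.filter (fun p => g p == s'))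
        = K'.flatMap (fun s' => (ps.filter (fun p => !(g p == s))).filter (fun p => g p == s')) := by
      rw [List.flatMap_def, List.flatMap_def]
      congr 1
      apply List.map_congr_left
      intro s' hs'
      have hss : s' ≠ s := fun h => hns (h ▸ hs')
      rw [List.filter_filter]
      apply List.filter_congr
      intro p _
      by_cases hp : g p = s'
      · simp [hp, hss]
      · simp [beq_eq_false_iff_ne.mpr hp]
    rw [hcongr]
    have hperm' := ih (ps.filter (fun p => !(g p == s))) hnd' (by
      intro p hp
      have hmem := (List.mem_filter.mp hp).1
      have hne : (!(g p == s)) = true := (List.mem_filter.mp hp).2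
      rcases List.mem_cons.mp (hcov p hmem) with h | h
      · exfalso; rw [h] at hne; simp at hne
      · exact h)
    exact (List.Perm.append_left _ hperm').trans
      (List.filter_append_perm (fun p => g p == s) ps)

-- ---- flattened form of port A ----

def pvF (array : List Int) (n : Int) : Int → Option (Int × Int) :=
  fun v => (pvPairs n).find? (fun p => pvSum array p == v)

def pvCandsA (array : List Int) (n : Int) : List (List Int) :=
  (pvPairs n).filterMap (pvCand array (pvF array n))

def pvRunA (array : List Int) : List Int :=
  let n : Int := (array.length : Int)
  let st := (pvPairs n).foldl (pvStepA array)
      ((PySem.Dict.empty : PySem.Dict Int (Int × Int)), [n, n, n, n])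
  if st.2 ≠ [n, n, n, n] then st.2 else []

theorem pvA_eq_runA (array : List Int) : equal_hash array = pvRunA array := by
  unfold equal_hash pvRunA
  exact congrArg (fun st : PySem.Dict Int (Int × Int) × List Int =>
    if st.2 ≠ [(array.length : Int), _, _, _] then st.2 else [])
    (pvFoldlNested (array.length : Int) (pvStepA array) _)

theorem pvStepB_filterMap (array : List Int) (f : Int → Option (Int × Int))
    (ps : List (Int × Int)) (r : List Int) :
    ps.foldl (pvStepB array f) r = (ps.filterMap (pvCand array f)).foldl pvMinL r := by
  rw [List.foldl_filterMap]
  apply PySem.List.foldl_congr_mem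
  intro acc p _
  unfold pvStepB
  cases pvCand array f p <;> rfl

theorem pvRunA_eq (array : List Int) :
    pvRunA array =
      (let n : Int := (array.length : Int)
       let res := (pvCandsA array n).foldl pvMinL [n, n, n, n]
       if res ≠ [n, n, n, n] then res else []) := by
  unfold pvRunA
  dsimp only
  rw [pvMain array (pvF array (array.length : Int)) (pvPairs (array.length : Int))
    PySem.Dict.empty
    [(array.length : Int), (array.length : Int), (array.length : Int), (array.length : Int)]
    (fun v => by simp [pvF, PySem.Dict.get?_empty]),
    pvStepB_filterMap]
  rfl

-- ---- flattened form of port B ----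

def pvCandsB (array : List Int) (n : Int) : List (List Int) :=
  ((PySem.Set.update ([] : List Int) ((pvPairs n).map (fun p => pvSum array p))).flatMap
    (fun s => (pvPairs n).filter (fun p => pvSum array p == s))).filterMap
    (pvCand array (pvF array n))

/-- Phase 2 of B, as a function of the groups dict. -/
def pvPhase2 (groups : PySem.Dict Int (List (Int × Int))) : List Int :=
  match groups.values.foldl (fun (best : Option (List Int)) pairs =>
      let q := PySem.List.pyGetD pairs 0 (0, 0)
      (PySem.List.slice pairs (some 1) none).foldl (fun best p =>
        if q.1 < p.1 ∧ q.2 ≠ p.1 ∧ q.2 ≠ p.2 then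
          match best with
          | none => some [q.1, q.2, p.1, p.2]
          | some b => if pyListLt [q.1, q.2, p.1, p.2] b then some [q.1, q.2, p.1, p.2] else some b
        else best) best) none with
  | some r => r
  | none => []

theorem pvB_stage1 (array : List Int) :
    equal_hash_alt array =
      pvPhase2 ((pvPairs (array.length : Int)).foldl
        (fun d p => d.modify (pvSum array p) [] (· ++ [p])) PySem.Dict.empty) := by
  unfold equal_hash_alt
  exact congrArg pvPhase2
    (pvFoldlNested (array.length : Int)
      (fun d p => d.modify (pvSum array p) [] (· ++ [p])) PySem.Dict.empty)

/-- One group's scan (first pair vs rest) is the pvOStep fold over its candidates. -/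
theorem pvGroup (array : List Int) (ps : List (Int × Int)) (s : Int)
    (hs : ∃ p ∈ ps, pvSum array p = s) (best : Option (List Int)) :
    (let lst := ps.filter (fun p => pvSum array p == s)
     let q := PySem.List.pyGetD lst 0 (0, 0)
     (PySem.List.slice lst (some 1) none).foldl (fun best p =>
        if q.1 < p.1 ∧ q.2 ≠ p.1 ∧ q.2 ≠ p.2 then
          match best with
          | none => some [q.1, q.2, p.1, p.2]
          | some b => if pyListLt [q.1, q.2, p.1, p.2] b then some [q.1, q.2, p.1, p.2] else some b
        else best) best)
    = ((ps.filter (fun p => pvSum array p == s)).filterMap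
        (pvCand array (fun v => ps.find? (fun p' => pvSum array p' == v)))).foldl pvOStep best := by
  obtain ⟨p0, hp0, hs0⟩ := hs
  have hp0' : p0 ∈ ps.filter (fun p => pvSum array p == s) :=
    List.mem_filter.mpr ⟨hp0, by simp [hs0]⟩
  cases hl : ps.filter (fun p => pvSum array p == s) with
  | nil => rw [hl] at hp0'; cases hp0'
  | cons q0 rest =>
    dsimp only
    rw [PySem.List.pyGetD_zero_cons, PySem.List.slice_from_one]
    simp only [List.tail_cons]
    have hq0 : ps.find? (fun p' => pvSum array p' == s) = some q0 := by
      rw [← List.head?_filter, hl]; rfl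
    have hcand : ∀ p ∈ q0 :: rest,
        pvCand array (fun v => ps.find? (fun p' => pvSum array p' == v)) p = pvCandQ q0 p := by
      intro p hp
      have hp2 : p ∈ ps.filter (fun p => pvSum array p == s) := by rw [hl]; exact hp
      have hps : pvSum array p = s := by simpa using (List.mem_filter.mp hp2).2
      unfold pvCand pvCandQ
      simp only [hps, hq0]
    rw [List.filterMap_congr hcand]
    have hnone : pvCandQ q0 q0 = none := by
      unfold pvCandQ; rw [if_neg]; rintro ⟨h, -⟩; exact lt_irrefl _ h
    simp only [List.filterMap_cons, hnone]
    rw [List.foldl_filterMap]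
    apply PySem.List.foldl_congr_mem
    intro acc p _
    unfold pvCandQ pvOStep
    split_ifs with h
    · cases acc with
      | none => rfl
      | some b =>
          simp only [pvMinL]
          split_ifs <;> rfl
    · rfl

theorem pvFoldValues (array : List Int) (ps : List (Int × Int)) :
    ((ps.foldl (fun d p => d.modify (pvSum array p) [] (· ++ [p])) PySem.Dict.empty).values.foldl
      (fun (best : Option (List Int)) pairs =>
        let q := PySem.List.pyGetD pairs 0 (0, 0)
        (PySem.List.slice pairs (some 1) none).foldl (fun best p =>
          if q.1 < p.1 ∧ q.2 ≠ p.1 ∧ q.2 ≠ p.2 then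
            match best with
            | none => some [q.1, q.2, p.1, p.2]
            | some b => if pyListLt [q.1, q.2, p.1, p.2] b then some [q.1, q.2, p.1, p.2] else some b
          else best) best) none)
    = (((PySem.Set.update ([] : List Int) (ps.map (fun p => pvSum array p))).flatMap
        (fun s => ps.filter (fun p => pvSum array p == s))).filterMap
        (pvCand array (fun v => ps.find? (fun p' => pvSum array p' == v)))).foldl pvOStep none := by
  have hnd : (ps.foldl (fun d p => d.modify (pvSum array p) [] (· ++ [p]))
      PySem.Dict.empty).keys.Nodup :=
    PySem.Dict.nodup_keys_foldl_modify_key ps (fun p => pvSum array p) []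
      (fun _ p => (· ++ [p])) PySem.Dict.empty PySem.Dict.nodup_keys_empty
  have hkeys : (ps.foldl (fun d p => d.modify (pvSum array p) [] (· ++ [p]))
      PySem.Dict.empty).keys
      = PySem.Set.update ([] : List Int) (ps.map (fun p => pvSum array p)) := by
    have h := PySem.Dict.keys_foldl_modify_key ps (fun p => pvSum array p) []
      (fun _ p => (· ++ [p])) PySem.Dict.empty
    simpa [PySem.Dict.keys_empty] using h
  have hgetD : ∀ s, (ps.foldl (fun d p => d.modify (pvSum array p) [] (· ++ [p]))
      PySem.Dict.empty).getD s []
      = ps.filter (fun p => pvSum array p == s) := by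
    intro s
    have h1 : ps.foldl (fun d p => d.modify (pvSum array p) [] (· ++ [p])) PySem.Dict.empty
        = (ps.map (fun p => (pvSum array p, p))).foldl
            (fun d q => d.modify q.1 [] (· ++ [q.2])) PySem.Dict.empty := by
      rw [List.foldl_map]
    rw [h1, PySem.Dict.getD_foldl_modify_append]
    simp [List.filter_map, Function.comp_def, List.map_map]
  have hvalues : (ps.foldl (fun d p => d.modify (pvSum array p) [] (· ++ [p]))
      PySem.Dict.empty).values
      = (PySem.Set.update ([] : List Int) (ps.map (fun p => pvSum array p))).map
          (fun s => ps.filter (fun p => pvSum array p == s)) := by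
    rw [PySem.Dict.values_eq_map_keys _ hnd ([] : List (Int × Int)), hkeys]
    exact List.map_congr_left (fun s _ => hgetD s)
  rw [hvalues, List.foldl_map, List.filterMap_flatMap, List.foldl_flatMap]
  apply PySem.List.foldl_congr_mem
  intro acc s hsK
  have hs : ∃ p ∈ ps, pvSum array p = s := by
    rcases (PySem.Set.mem_update ([] : List Int) _ s).mp hsK with h | h
    · cases h
    · rcases List.mem_map.mp h with ⟨p, hp, hps⟩
      exact ⟨p, hp, hps⟩
  exact pvGroup array ps s hs acc

theorem pvB_eq (array : List Int) :
    equal_hash_alt array =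
      (match (pvCandsB array (array.length : Int)).foldl pvOStep none with
       | some r => r
       | none => []) := by
  rw [pvB_stage1]
  unfold pvPhase2
  exact congrArg (fun o : Option (List Int) =>
    match o with | some r => r | none => ([] : List Int))
    (pvFoldValues array (pvPairs (array.length : Int)))

theorem pvPerm (array : List Int) :
    (pvCandsB array (array.length : Int)).Perm (pvCandsA array (array.length : Int)) := by
  apply List.Perm.filterMap
  apply pvGroupPerm
  · exact PySem.Set.nodup_update _ _ List.nodup_nil
  · intro p hp
    rw [PySem.Set.mem_update]
    exact Or.inr (List.mem_map_of_mem hp)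

theorem pvCandsA_lt (array : List Int) (c : List Int)
    (hc : c ∈ pvCandsA array (array.length : Int)) :
    pyListLt c [(array.length : Int), (array.length : Int), (array.length : Int),
      (array.length : Int)] = true := by
  rw [pvCandsA, List.mem_filterMap] at hc
  obtain ⟨p, hp, hcand⟩ := hc
  have hp1 : p.1 < (array.length : Int) - 1 := by
    rw [pvPairs, List.mem_flatMap] at hp
    obtain ⟨i, hi, hpi⟩ := hp
    rw [List.mem_map] at hpi
    obtain ⟨j, _, hj⟩ := hpi
    have := (PySem.List.mem_pyRange_one).mp hi
    rw [← hj]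
    exact this.2
  unfold pvCand at hcand
  split at hcand
  next q _ =>
    by_cases hcond : q.1 < p.1 ∧ q.2 ≠ p.1 ∧ q.2 ≠ p.2
    · rw [if_pos hcond] at hcand
      cases hcand
      simp only [pyListLt, Bool.or_eq_true, decide_eq_true_eq]
      exact Or.inl (by omega)
    · rw [if_neg hcond] at hcand
      cases hcand
  next _ => cases hcand

-- ===== VERDICT (by name: the statement is the Claim_ definition above) =====
theorem equal_hash_spec : Claim_equal_equal_hash := by
  intro array _
  unfold Spec_equal_hash
  rw [pvA_eq_runA, pvRunA_eq, pvB_eq]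
  dsimp only
  have hperm := pvPerm array
  have heq : (pvCandsA array (array.length : Int)).foldl pvMinL
      [(array.length : Int), (array.length : Int), (array.length : Int), (array.length : Int)]
      = (pvCandsB array (array.length : Int)).foldl pvMinL
      [(array.length : Int), (array.length : Int), (array.length : Int), (array.length : Int)] :=
    (hperm.symm.foldl_eq' (fun x _ y _ z => pvMinL_right_comm z x y) _)
  cases hcb : pvCandsB array (array.length : Int) with
  | nil =>
    have hca : pvCandsA array (array.length : Int) = [] :=
      List.nil_perm.mp (hcb ▸ hperm)
    rw [hca]
    simp
  | cons c cs =>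
    rw [hcb] at heq
    have hcmem : ∀ x ∈ c :: cs, pyListLt x [(array.length : Int), (array.length : Int),
        (array.length : Int), (array.length : Int)] = true := by
      intro x hx
      apply pvCandsA_lt
      apply hperm.mem_iff.mp
      rw [hcb]
      exact hx
    have hsent : pvMinL [(array.length : Int), (array.length : Int), (array.length : Int),
        (array.length : Int)] c = c := by
      unfold pvMinL
      rw [if_pos (hcmem c List.mem_cons_self)]
    have hres : (pvCandsA array (array.length : Int)).foldl pvMinL
        [(array.length : Int), (array.length : Int), (array.length : Int), (array.length : Int)]
        = cs.foldl pvMinL c := by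
      rw [heq, List.foldl_cons, hsent]
    have hostep : (c :: cs).foldl pvOStep none = some (cs.foldl pvMinL c) := by
      rw [List.foldl_cons]
      exact pvOStep_some cs c
    rw [hostep]
    rw [hres]
    have hne : cs.foldl pvMinL c ≠ [(array.length : Int), (array.length : Int),
        (array.length : Int), (array.length : Int)] := by
      intro hcontra
      have hmem : cs.foldl pvMinL c = c ∨ cs.foldl pvMinL c ∈ cs := pvFoldlMinL_mem cs c
      have hlt : pyListLt (cs.foldl pvMinL c) [(array.length : Int), (array.length : Int),
          (array.length : Int), (array.length : Int)] = true := by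
        rcases hmem with h | h
        · rw [h]; exact hcmem c List.mem_cons_self
        · exact hcmem _ (List.mem_cons_of_mem _ h)
      rw [hcontra, pyListLt_irrefl] at hlt
      exact Bool.false_ne_true hlt
    rw [if_pos hne]
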